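-- pv_equiv track=rewrite | github.com/SA-Inc/-Algorithm-and-Data-Structures | stack/monotonic.py | monotonic_dec_stack
-- ===== SOURCE A (Python) =====
-- def monotonic_dec_stack(arr):
--   n = len(arr)
--
--   stack = []
--
--   for i in range(0, n, 1):
--     while(len(stack) > 0 and stack[len(stack) - 1] <= arr[i]):
--       stack.pop()
--     stack.append(arr[i])
--
--   return stack
-- ===== SOURCE B (Python) =====
-- def monotonic_dec_stack(arr):
--   res = []
--   for x in reversed(arr):
--     if not res or x > res[-1]:
--       res.append(x)
--   res.reverse()
--   return res
-- ===== Notes on version B (the rewrite author's own statement) =====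
-- stated objective: alternative
-- what changed: Replaces the left-to-right while-pop stack simulation with a single right-to-left running-max scan that collects the strict suffix maxima and reverses them at the end.
import Mathlib
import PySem

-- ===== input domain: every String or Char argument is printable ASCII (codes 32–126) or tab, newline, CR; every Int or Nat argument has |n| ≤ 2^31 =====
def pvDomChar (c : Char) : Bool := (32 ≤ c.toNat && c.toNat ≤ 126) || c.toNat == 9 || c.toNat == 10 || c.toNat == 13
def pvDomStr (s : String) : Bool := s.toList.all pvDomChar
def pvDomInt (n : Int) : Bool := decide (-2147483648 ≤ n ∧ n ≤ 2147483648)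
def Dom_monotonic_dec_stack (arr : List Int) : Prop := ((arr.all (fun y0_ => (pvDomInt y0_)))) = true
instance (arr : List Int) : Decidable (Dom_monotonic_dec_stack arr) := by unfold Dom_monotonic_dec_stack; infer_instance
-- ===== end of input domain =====

-- B replaces A's while-pop stack simulation by a right-to-left running-max scan (same cost, different algorithm).

-- ===== PORT A =====
-- the inner 'while' loop: pop the top of the stack while it is <= x
def pvPopW (st : List Int) (x : Int) : List Int :=
  match h : st.getLast? with
  | some m => if m ≤ x then pvPopW st.dropLast x else st
  | none => st
termination_by st.length
decreasing_by
  have hne : st ≠ [] := by intro he; simp [he] at h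
  have hpos : 0 < st.length := List.length_pos_iff.mpr hne
  simp [List.length_dropLast]; omega

def monotonic_dec_stack (arr : List Int) : List Int :=
  arr.foldl (fun st x => pvPopW st x ++ [x]) []

-- ===== PORT B =====
def monotonic_dec_stack_alt (arr : List Int) : List Int :=
  (arr.reverse.foldl (fun res x =>
    match res.getLast? with
    | none => res ++ [x]
    | some m => if m < x then res ++ [x] else res) []).reverse

-- ===== PRECONDITION & SPEC =====
def Spec_monotonic_dec_stack (arr : List Int) (out : List Int) : Prop := out = monotonic_dec_stack_alt arr
instance (arr : List Int) (out : List Int) : Decidable (Spec_monotonic_dec_stack arr out) := by unfold Spec_monotonic_dec_stack; infer_instance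

-- ===== CLAIM (what is proved, stated in full; the proofs are below) =====
def Claim_equal_monotonic_dec_stack : Prop := ∀ (arr : List Int), Dom_monotonic_dec_stack arr → Spec_monotonic_dec_stack arr (monotonic_dec_stack arr)

-- ===== LEMMAS AND PROOFS =====

-- the strict suffix maxima of l, in increasing value order; common reference point of both ports
def pvSmr : List Int → List Int
  | [] => []
  | x :: t => if t.all (fun y => decide (y < x)) then pvSmr t ++ [x] else pvSmr t

-- A's push step on the reversed stack (top at the head)
def pvStepR (r : List Int) (x : Int) : List Int := x :: r.dropWhile (fun y => decide (y ≤ x))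

theorem pv_dropWhile_dropWhile {p q : Int → Bool} (h : ∀ y, q y = true → p y = true) :
    ∀ l : List Int, (l.dropWhile q).dropWhile p = l.dropWhile p := by
  intro l
  induction l with
  | nil => rfl
  | cons a t ih =>
    by_cases hq : q a = true
    · have hp := h a hq
      simp [List.dropWhile, hq, hp, ih]
    · simp [List.dropWhile, hq]

theorem pv_dropWhile_congr {p q : Int → Bool} (h : ∀ y, p y = q y) (l : List Int) :
    l.dropWhile p = l.dropWhile q := by
  have : p = q := funext h
  rw [this]

theorem pv_popw_rev (x : Int) : ∀ st : List Int,
    pvPopW st x = (st.reverse.dropWhile (fun y => decide (y ≤ x))).reverse := by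
  intro st
  induction st using List.reverseRecOn with
  | nil => simp [pvPopW]
  | append_singleton s a ih =>
    rw [pvPopW]
    split
    · rename_i m h
      rw [List.getLast?_concat] at h
      have hma : m = a := (Option.some.inj h).symm
      subst hma
      rw [List.dropLast_concat]
      by_cases hle : m ≤ x
      · simp only [if_pos hle, List.reverse_append, List.reverse_singleton,
          List.singleton_append, List.dropWhile_cons, decide_eq_true hle, ih]
        simp
      · simp only [if_neg hle, List.reverse_append, List.reverse_singleton,
          List.singleton_append, List.dropWhile_cons, decide_eq_false hle]
        simp
    · rename_i h
      simp at h

theorem pv_foldA_rev : ∀ (l : List Int) (st : List Int),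
    l.foldl (fun st x => pvPopW st x ++ [x]) st = (l.foldl pvStepR st.reverse).reverse := by
  intro l
  induction l with
  | nil => intro st; simp
  | cons x t ih =>
    intro st
    have hstep : pvPopW st x ++ [x] = (pvStepR st.reverse x).reverse := by
      simp [pvStepR, pv_popw_rev]
    simp only [List.foldl_cons, hstep, ih, List.reverse_reverse]

theorem pv_foldR_smr : ∀ (l : List Int) (r : List Int),
    l.foldl pvStepR r = pvSmr l ++ r.dropWhile (fun y => l.any (fun z => decide (y ≤ z))) := by
  intro l
  induction l with
  | nil =>
    intro r
    have : ∀ s : List Int, List.dropWhile (fun _ : Int => false) s = s := by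
      intro s; induction s with
      | nil => rfl
      | cons a u ihs => simp [List.dropWhile, ihs]
    simp [pvSmr, this]
  | cons x t ih =>
    intro r
    simp only [List.foldl_cons, pvStepR, ih]
    by_cases hx : (t.all fun y => decide (y < x)) = true
    · -- x is strictly greater than everything after it: it survives
      have hPx : (t.any fun z => decide (x ≤ z)) = false := by
        simp only [List.all_eq_true, decide_eq_true_eq] at hx
        simp only [List.any_eq_false, decide_eq_true_eq]
        intro z hz; exact not_le.mpr (hx z hz)
      have hpred : ∀ y : Int, (decide (y ≤ x) : Bool) =
          ((x :: t).any fun z => decide (y ≤ z)) := by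
        intro y
        simp only [List.any_cons]
        by_cases hy : y ≤ x
        · simp [hy]
        · simp only [decide_eq_false hy, Bool.false_or]
          symm
          simp only [List.any_eq_false, decide_eq_true_eq]
          simp only [List.all_eq_true, decide_eq_true_eq] at hx
          intro z hz hyz
          exact hy (le_trans hyz (le_of_lt (hx z hz)))
      have hd : List.dropWhile (fun y => decide (y ≤ x)) r =
          r.dropWhile (fun y => (x :: t).any fun z => decide (y ≤ z)) :=
        pv_dropWhile_congr hpred r
      simp only [List.dropWhile_cons, hPx, Bool.false_eq_true, if_false]
      simp only [pvSmr, hx, if_true, List.append_assoc, List.singleton_append]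
      rw [hd]
    · -- some later element is ≥ x: x is popped later / never recorded
      have hany : (t.any fun z => decide (x ≤ z)) = true := by
        simp only [List.all_eq_true, decide_eq_true_eq] at hx
        push_neg at hx
        obtain ⟨z, hz, hzx⟩ := hx
        simp only [List.any_eq_true, decide_eq_true_eq]
        exact ⟨z, hz, hzx⟩
      obtain ⟨z, hz, hxz⟩ : ∃ z ∈ t, x ≤ z := by
        simpa [List.any_eq_true] using hany
      have himp : ∀ y : Int, (decide (y ≤ x) : Bool) = true →
          (t.any fun w => decide (y ≤ w)) = true := by
        intro y hy
        simp only [decide_eq_true_eq] at hy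
        simp only [List.any_eq_true, decide_eq_true_eq]
        exact ⟨z, hz, le_trans hy hxz⟩
      have hpred : ∀ y : Int, ((x :: t).any fun w => decide (y ≤ w)) =
          (t.any fun w => decide (y ≤ w)) := by
        intro y
        simp only [List.any_cons]
        by_cases hy : y ≤ x
        · simp only [decide_eq_true hy, Bool.true_or]
          exact (himp y (decide_eq_true hy)).symm
        · simp [decide_eq_false hy]
      simp only [List.dropWhile_cons, hany, if_true]
      rw [pv_dropWhile_dropWhile himp r]
      simp only [pvSmr, hx, Bool.false_eq_true, if_false]
      rw [pv_dropWhile_congr hpred r]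

theorem pv_smr_last : ∀ t : List Int,
    (pvSmr t = [] → t = []) ∧
    (∀ m, (pvSmr t).getLast? = some m → m ∈ t ∧ ∀ y ∈ t, y ≤ m) := by
  intro t
  induction t with
  | nil => simp [pvSmr]
  | cons x s ih =>
    by_cases hx : (s.all fun y => decide (y < x)) = true
    · constructor
      · intro h
        simp only [pvSmr, hx, if_true] at h
        simp at h
      · intro m hm
        simp only [pvSmr, hx, if_true, List.getLast?_concat] at hm
        injection hm with hm'
        subst hm'
        refine ⟨List.mem_cons_self, ?_⟩
        intro y hy
        rcases List.mem_cons.mp hy with h1 | h2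
        · exact le_of_eq h1
        · simp only [List.all_eq_true, decide_eq_true_eq] at hx
          exact le_of_lt (hx y h2)
    · have hsne : s ≠ [] := by
        intro he; subst he; simp at hx
      constructor
      · intro h
        simp only [pvSmr, hx, Bool.false_eq_true, if_false] at h
        exact absurd (ih.1 h) hsne
      · intro m hm
        simp only [pvSmr, hx, Bool.false_eq_true, if_false] at hm
        obtain ⟨hmem, hmax⟩ := ih.2 m hm
        refine ⟨List.mem_cons_of_mem _ hmem, ?_⟩
        intro y hy
        rcases List.mem_cons.mp hy with h1 | h2
        · subst h1
          simp only [List.all_eq_true, decide_eq_true_eq] at hx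
          push_neg at hx
          obtain ⟨z, hz, hzx⟩ := hx
          exact le_trans hzx (hmax z hz)
        · exact hmax y h2

theorem pv_foldB_smr : ∀ l : List Int,
    l.reverse.foldl (fun res x =>
      match res.getLast? with
      | none => res ++ [x]
      | some m => if m < x then res ++ [x] else res) [] = pvSmr l := by
  intro l
  induction l with
  | nil => rfl
  | cons x t ih =>
    rw [List.reverse_cons, List.foldl_append, ih]
    simp only [List.foldl_cons, List.foldl_nil]
    cases hlast : (pvSmr t).getLast? with
    | none =>
      have ht : t = [] := (pv_smr_last t).1 (List.getLast?_eq_none_iff.mp hlast)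
      subst ht
      simp [pvSmr]
    | some m =>
      obtain ⟨hmem, hmax⟩ := (pv_smr_last t).2 m hlast
      by_cases hlt : m < x
      · have hall : (t.all fun y => decide (y < x)) = true := by
          simp only [List.all_eq_true, decide_eq_true_eq]
          intro y hy; exact lt_of_le_of_lt (hmax y hy) hlt
        simp [pvSmr, hall, hlt]
      · have hall : (t.all fun y => decide (y < x)) = false := by
          simp only [List.all_eq_false]
          exact ⟨m, hmem, by simpa using hlt⟩
        simp [pvSmr, hall, hlt]

-- ===== VERDICT (by name: the statement is the Claim_ definition above) =====
theorem monotonic_dec_stack_spec : Claim_equal_monotonic_dec_stack := by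
  intro arr _
  unfold Spec_monotonic_dec_stack monotonic_dec_stack monotonic_dec_stack_alt
  rw [pv_foldB_smr, pv_foldA_rev]
  have h := pv_foldR_smr arr []
  simp only [List.dropWhile_nil, List.append_nil] at h
  rw [List.reverse_nil, h]
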